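-- pv_equiv track=rewrite | github.com/dapitch666/AdventOfCodePython | aoc/year2025/day10.py | build_patterns
-- ===== SOURCE A (Python) =====
-- from collections import defaultdict
-- from itertools import product
--
-- def build_patterns(buttons, size):
--     effects = {}
--     patterns = defaultdict(list)
--
--     for mask in product((0, 1), repeat = len(buttons)):
--         delta = [0] * size
--         for i, p in enumerate(mask):
--             for j in buttons[i]:
--                 delta[j] += p
--         lights = tuple(x % 2 for x in delta)
--         effects[mask] = tuple(delta)
--         patterns[lights].append(mask)
--
--     return effects, patterns
-- ===== SOURCE B (Python) =====
-- def build_patterns(buttons, size):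
--     effects = {}
--     patterns = {}
--     n = len(buttons)
--     delta = [0] * size
--
--     def rec(i, mask):
--         if i == n:
--             m = tuple(mask)
--             effects[m] = tuple(delta)
--             lights = tuple(x % 2 for x in delta)
--             patterns.setdefault(lights, []).append(m)
--             return
--         # branch 0: button i not pressed
--         mask.append(0)
--         rec(i + 1, mask)
--         mask.pop()
--         # branch 1: button i pressed
--         for j in buttons[i]:
--             delta[j] += 1
--         mask.append(1)
--         rec(i + 1, mask)
--         mask.pop()
--         for j in buttons[i]:
--             delta[j] -= 1
--
--     rec(0, [])
--     return effects, patterns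
-- ===== Notes on version B (the rewrite author's own statement) =====
-- stated objective: alternative
-- what changed: Replaces the itertools.product loop that recomputes delta from scratch for each mask by a recursion over the buttons that threads the running delta as an accumulator (add button i's indices before the pressed branch, undo after), recording effects/patterns at the leaves in the same lexicographic order.
import Mathlib
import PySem

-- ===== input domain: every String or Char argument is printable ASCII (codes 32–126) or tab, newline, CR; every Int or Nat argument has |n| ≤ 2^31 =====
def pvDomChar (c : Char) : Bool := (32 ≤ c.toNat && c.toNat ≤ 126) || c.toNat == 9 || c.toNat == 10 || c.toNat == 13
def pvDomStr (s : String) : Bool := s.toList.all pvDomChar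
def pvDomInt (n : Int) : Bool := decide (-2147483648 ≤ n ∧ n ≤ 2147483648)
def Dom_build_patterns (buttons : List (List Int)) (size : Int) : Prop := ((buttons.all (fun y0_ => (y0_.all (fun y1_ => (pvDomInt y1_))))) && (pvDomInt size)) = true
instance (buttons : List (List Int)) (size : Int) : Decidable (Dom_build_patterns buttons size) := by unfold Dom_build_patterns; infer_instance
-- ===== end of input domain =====

-- B replaces A's itertools.product double loop by a recursion over the buttons that
-- threads the running delta as an accumulator (objective: alternative decomposition).

-- Python list write 'delta[j] += p' (negative index wraps; out-of-range is excluded by Pre_);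
-- exact on the in-range/wrap cases, identity where Python would raise.
def pvIdx (d : List Int) (j : Int) : Int := if j < 0 then j + (d.length : Int) else j
def pvUpd (d : List Int) (j p : Int) : List Int :=
  if 0 ≤ pvIdx d j ∧ pvIdx d j < (d.length : Int) then
    d.set (pvIdx d j).toNat (d.getD (pvIdx d j).toNat 0 + p)
  else d

-- ===== PORT A =====
-- product((0, 1), repeat = n), in itertools order (leftmost position varies slowest)
def pvProd01 : Nat → List (List Int)
  | 0 => [([] : List Int)]
  | n + 1 => ([0, 1] : List Int).flatMap (fun x => (pvProd01 n).map (fun m => x :: m))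

-- the inner double loop of A: delta = [0]*size; for i,p in enumerate(mask): for j in buttons[i]: delta[j] += p
def pvDeltaA (buttons : List (List Int)) (size : Int) (mask : List Int) : List Int :=
  (PySem.List.enumerate mask 0).foldl
    (fun d ip => (PySem.List.pyGetD buttons ip.1 []).foldl (fun d j => pvUpd d j ip.2) d)
    (List.replicate size.toNat 0)

def build_patterns (buttons : List (List Int)) (size : Int) :
    (List (List Int × List Int)) × (List (List Int × List (List Int))) :=
  let st := (pvProd01 buttons.length).foldl
    (fun (st : PySem.Dict (List Int) (List Int) × PySem.Dict (List Int) (List (List Int))) mask =>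
      let delta := pvDeltaA buttons size mask
      let lights := delta.map (fun x => PySem.Int.mod x 2)
      (st.1.insert mask delta, st.2.insert lights (st.2.getD lights [] ++ [mask])))
    (PySem.Dict.empty, PySem.Dict.empty)
  (st.1.items, st.2.items)

-- ===== PORT B =====
-- for j in buttons[i]: delta[j] += 1
def pvAdd1 (b : List Int) (d : List Int) : List Int := b.foldl (fun d j => pvUpd d j 1) d

-- rec(i, mask) of B: decide button i (0 first, then 1 with b's indices added to delta),
-- recording (effects, patterns) at the base case
def pvRecB (bs : List (List Int)) (delta mask : List Int)
    (st : PySem.Dict (List Int) (List Int) × PySem.Dict (List Int) (List (List Int))) :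
    PySem.Dict (List Int) (List Int) × PySem.Dict (List Int) (List (List Int)) :=
  match bs with
  | [] =>
      let lights := delta.map (fun x => PySem.Int.mod x 2)
      (st.1.insert mask delta, st.2.insert lights (st.2.getD lights [] ++ [mask]))
  | b :: rest =>
      let st1 := pvRecB rest delta (mask ++ [0]) st
      pvRecB rest (pvAdd1 b delta) (mask ++ [1]) st1

def build_patterns_alt (buttons : List (List Int)) (size : Int) :
    (List (List Int × List Int)) × (List (List Int × List (List Int))) :=
  let st := pvRecB buttons (List.replicate size.toNat 0) [] (PySem.Dict.empty, PySem.Dict.empty)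
  (st.1.items, st.2.items)

-- ===== PRECONDITION & SPEC =====
-- Pre_ excludes exactly the inputs where A raises IndexError: some button index j outside
-- Python's valid (wrapping) range for a list of length max(size,0).
def Pre_build_patterns (buttons : List (List Int)) (size : Int) : Prop :=
  ∀ b ∈ buttons, ∀ j ∈ b, -(max size 0) ≤ j ∧ j < max size 0
instance (buttons : List (List Int)) (size : Int) : Decidable (Pre_build_patterns buttons size) := by
  unfold Pre_build_patterns; infer_instance
def pvWitness_build_patterns : List (List Int) × Int := ([[0], [1], [0, 1]], 2)

def Spec_build_patterns (buttons : List (List Int)) (size : Int) (out : (List (List Int × List Int)) × (List (List Int × List (List Int)))) : Prop := out = build_patterns_alt buttons size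
instance (buttons : List (List Int)) (size : Int) (out : (List (List Int × List Int)) × (List (List Int × List (List Int)))) : Decidable (Spec_build_patterns buttons size out) := by unfold Spec_build_patterns; infer_instance

-- ===== CLAIM (what is proved, stated in full; the proofs are below) =====
def Claim_equal_build_patterns : Prop := ∀ (buttons : List (List Int)) (size : Int), Dom_build_patterns buttons size → Pre_build_patterns buttons size → Spec_build_patterns buttons size (build_patterns buttons size)

-- ===== LEMMAS AND PROOFS =====

-- abbreviation for the state type
def pvSt := PySem.Dict (List Int) (List Int) × PySem.Dict (List Int) (List (List Int))

-- the base-case recording step (shared shape of both ports' bodies)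
def pvStep (mask delta : List Int) (st : pvSt) : pvSt :=
  let lights := delta.map (fun x => PySem.Int.mod x 2)
  (st.1.insert mask delta, st.2.insert lights (st.2.getD lights [] ++ [mask]))

-- delta produced by B for a given mask, as a function of the suffix of buttons
def pvDeltaOf : List (List Int) → List Int → List Int → List Int
  | b :: bs, p :: m, d => pvDeltaOf bs m (if p = 1 then pvAdd1 b d else d)
  | _, _, d => d

lemma pvUpd_zero (d : List Int) (j : Int) : pvUpd d j 0 = d := by
  unfold pvUpd
  split
  · rename_i h
    have hlt : (pvIdx d j).toNat < d.length := by omega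
    rw [List.getD_eq_getElem _ _ hlt, Int.add_zero]
    exact List.set_getElem_self hlt
  · rfl

lemma pvApply_zero (b : List Int) (d : List Int) :
    b.foldl (fun d j => pvUpd d j 0) d = d := by
  induction b generalizing d with
  | nil => rfl
  | cons j b _ => simp [pvUpd_zero]

lemma mem_pvProd01 {n : Nat} {m : List Int} (h : m ∈ pvProd01 n) :
    m.length = n ∧ ∀ p ∈ m, p = 0 ∨ p = 1 := by
  induction n generalizing m with
  | zero => simp [pvProd01] at h; simp [h]
  | succ n ih =>
    simp only [pvProd01, List.mem_flatMap, List.mem_map] at h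
    obtain ⟨x, hx, m', hm', rfl⟩ := h
    obtain ⟨hl, hp⟩ := ih hm'
    refine ⟨by simp [hl], ?_⟩
    intro p hp'
    rcases List.mem_cons.mp hp' with rfl | hmem
    · simp at hx; omega
    · exact hp p hmem

lemma pvDeltaA_eq (bs : List (List Int)) :
    ∀ (pre : List (List Int)) (m d : List Int), m.length = bs.length →
      (∀ p ∈ m, p = 0 ∨ p = 1) →
      (PySem.List.enumerate m (pre.length : Int)).foldl
        (fun d ip => (PySem.List.pyGetD (pre ++ bs) ip.1 []).foldl (fun d j => pvUpd d j ip.2) d) d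
      = pvDeltaOf bs m d := by
  induction bs with
  | nil =>
    intro pre m d hlen _
    have : m = [] := List.eq_nil_of_length_eq_zero hlen
    subst this
    simp [PySem.List.enumerate_nil, pvDeltaOf]
  | cons b bs ih =>
    intro pre m d hlen hp
    cases m with
    | nil => simp at hlen
    | cons p m' =>
      rw [PySem.List.enumerate_cons, List.foldl_cons]
      have hget : PySem.List.pyGetD (pre ++ b :: bs) (pre.length : Int) [] = b := by
        rw [PySem.List.pyGetD_natCast]
        simp [List.getD]
      rw [hget]
      have hrw1 : ((pre.length : Int) + 1) = (((pre ++ [b]).length : Nat) : Int) := by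
        simp
      have hrw2 : pre ++ b :: bs = (pre ++ [b]) ++ bs := by simp
      rw [hrw1, hrw2]
      have hlen' : m'.length = bs.length := by simpa using hlen
      have hp' : ∀ q ∈ m', q = 0 ∨ q = 1 := fun q hq => hp q (List.mem_cons_of_mem _ hq)
      rw [ih (pre ++ [b]) m' _ hlen' hp']
      rcases hp p (List.mem_cons_self) with rfl | rfl
      · simp [pvDeltaOf, pvApply_zero]
      · simp [pvDeltaOf, pvAdd1]

lemma pvRecB_eq_foldl (bs : List (List Int)) :
    ∀ (delta mask : List Int) (st : pvSt),
      pvRecB bs delta mask st =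
        (pvProd01 bs.length).foldl (fun st m => pvStep (mask ++ m) (pvDeltaOf bs m delta) st) st := by
  induction bs with
  | nil =>
    intro delta mask st
    simp [pvRecB, pvProd01, pvDeltaOf, pvStep]
  | cons b bs ih =>
    intro delta mask st
    show pvRecB bs (pvAdd1 b delta) (mask ++ [1]) (pvRecB bs delta (mask ++ [0]) st) = _
    rw [ih, ih]
    simp only [pvProd01, List.length_cons, List.flatMap_cons, List.flatMap_nil,
      List.append_nil, List.foldl_append, List.foldl_map]
    have h0 : (fun (st : pvSt) m => pvStep (mask ++ [0] ++ m) (pvDeltaOf bs m delta) st)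
        = fun (st : pvSt) m => pvStep (mask ++ (0 : Int) :: m) (pvDeltaOf ((b :: bs)) ((0 : Int) :: m) delta) st := by
      funext st m; simp [pvDeltaOf]
    have h1 : (fun (st : pvSt) m => pvStep (mask ++ [1] ++ m) (pvDeltaOf bs m (pvAdd1 b delta)) st)
        = fun (st : pvSt) m => pvStep (mask ++ (1 : Int) :: m) (pvDeltaOf ((b :: bs)) ((1 : Int) :: m) delta) st := by
      funext st m; simp [pvDeltaOf]
    rw [h0, h1]

-- ===== VERDICT (by name: the statement is the Claim_ definition above) =====
theorem build_patterns_spec : Claim_equal_build_patterns := by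
  intro buttons size _ _
  show build_patterns buttons size = build_patterns_alt buttons size
  unfold build_patterns build_patterns_alt
  refine congrArg (fun (st : pvSt) => (st.1.items, st.2.items)) ?_
  rw [pvRecB_eq_foldl]
  apply PySem.List.foldl_congr_mem
  intro st m hm
  obtain ⟨hlen, hp⟩ := mem_pvProd01 hm
  have hd : pvDeltaA buttons size m = pvDeltaOf buttons m (List.replicate size.toNat 0) := by
    have h := pvDeltaA_eq buttons [] m (List.replicate size.toNat 0) hlen hp
    simp only [List.nil_append, List.length_nil, Int.natCast_zero] at h
    exact h
  simp [pvStep, hd]
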